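-- pv_equiv track=rewrite | github.com/GDSC-Hanyang/Algorithm-1- | 홍재희/codes/23.py | solution
-- ===== SOURCE A (Python) =====
-- def solution(price, money, count):
--     answer = -1
--     payment = 0
--     for i in range(count):
--         payment += price * (i + 1)
--     answer = payment - money
--     if answer > 0: return answer
--     else: return 0
-- ===== SOURCE B (Python) =====
-- def solution(price, money, count):
--     n = max(count, 0)
--     total = price * n * (n + 1) // 2
--     return max(total - money, 0)
-- ===== Notes on version B (the rewrite author's own statement) =====
-- stated objective: faster
-- what changed: replaces the O(count) summation loop with the closed-form arithmetic-series formula price*n*(n+1)//2 and max() for clamping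
import Mathlib
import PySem

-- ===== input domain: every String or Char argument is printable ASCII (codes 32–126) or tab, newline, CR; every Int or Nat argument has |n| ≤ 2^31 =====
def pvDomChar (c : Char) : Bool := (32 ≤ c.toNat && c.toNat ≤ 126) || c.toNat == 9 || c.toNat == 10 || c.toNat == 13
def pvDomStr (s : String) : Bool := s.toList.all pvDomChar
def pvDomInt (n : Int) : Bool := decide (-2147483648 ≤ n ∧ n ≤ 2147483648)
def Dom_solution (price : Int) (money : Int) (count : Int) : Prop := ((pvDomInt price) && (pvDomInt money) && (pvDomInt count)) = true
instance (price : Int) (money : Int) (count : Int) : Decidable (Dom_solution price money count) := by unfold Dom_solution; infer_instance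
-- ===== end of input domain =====

-- B replaces A's O(count) summation loop by the closed-form arithmetic series price*n*(n+1)//2 with max-clamping (faster, asymptotic).


-- ===== PORT A =====
def solution (price : Int) (money : Int) (count : Int) : Int :=
  let payment := (PySem.List.pyRange 0 count 1).foldl (fun acc i => acc + price * (i + 1)) 0
  let answer := payment - money
  if answer > 0 then answer else 0

-- ===== PORT B =====
def solution_alt (price : Int) (money : Int) (count : Int) : Int :=
  let n := max count 0
  let total := PySem.Int.floordiv (price * n * (n + 1)) 2
  max (total - money) 0

-- ===== PRECONDITION & SPEC =====
def Spec_solution (price : Int) (money : Int) (count : Int) (out : Int) : Prop := out = solution_alt price money count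
instance (price : Int) (money : Int) (count : Int) (out : Int) : Decidable (Spec_solution price money count out) := by unfold Spec_solution; infer_instance

-- ===== CLAIM (what is proved, stated in full; the proofs are below) =====
def Claim_equal_solution : Prop := ∀ (price : Int) (money : Int) (count : Int), Dom_solution price money count → Spec_solution price money count (solution price money count)

-- ===== LEMMAS AND PROOFS =====

theorem pv_foldl_sum (price : Int) (L : List Int) (init : Int) :
    L.foldl (fun acc i => acc + price * (i + 1)) init = init + price * (L.map (· + 1)).sum := by
  induction L generalizing init with
  | nil => simp
  | cons x xs ih => simp [List.foldl, ih]; ring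

theorem pv_sum_range (n : ℕ) :
    (((List.range n).map (fun k : ℕ => ((0 : Int) + k) + 1)).sum) * 2 = (n : Int) * (n + 1) := by
  induction n with
  | succ m ih =>
    rw [List.range_succ]
    simp only [List.map_append, List.sum_append, List.map_cons, List.map_nil, List.sum_cons,
      List.sum_nil]
    push_cast
    push_cast at ih
    linarith
  | zero => simp

theorem pv_payment (price count : Int) :
    (PySem.List.pyRange 0 count 1).foldl (fun acc i => acc + price * (i + 1)) 0
      = PySem.Int.floordiv (price * max count 0 * (max count 0 + 1)) 2 := by
  rw [pv_foldl_sum, PySem.List.pyRange_one, List.map_map]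
  have h0 : (count - 0).toNat = count.toNat := by simp
  rw [h0]
  have hcomp : ((fun x : Int => x + 1) ∘ fun k : ℕ => (0 : Int) + k)
      = fun k : ℕ => ((0 : Int) + k) + 1 := rfl
  rw [hcomp]
  have hS := pv_sum_range count.toNat
  generalize ((List.range count.toNat).map (fun k : ℕ => ((0 : Int) + k) + 1)).sum = S at hS ⊢
  have hmax : (count.toNat : Int) = max count 0 := Int.toNat_eq_max count
  rw [← hmax]
  have h2 : price * (count.toNat : Int) * ((count.toNat : Int) + 1) = 2 * (price * S) := by
    calc price * (count.toNat : Int) * ((count.toNat : Int) + 1)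
        = price * ((count.toNat : Int) * ((count.toNat : Int) + 1)) := by ring
      _ = price * (S * 2) := by rw [hS]
      _ = 2 * (price * S) := by ring
  rw [h2, PySem.Int.floordiv_eq_ediv_of_pos (by norm_num),
    Int.mul_ediv_cancel_left _ (by norm_num : (2 : Int) ≠ 0)]
  ring

-- ===== VERDICT (by name: the statement is the Claim_ definition above) =====
theorem solution_spec : Claim_equal_solution := by
  intro price money count _
  unfold Spec_solution solution solution_alt
  dsimp only
  rw [pv_payment]
  omega
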